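-- pv_equiv track=rewrite | github.com/blakefren/CrackingTheCodingInterview | chapter_1.py | one_four
-- ===== SOURCE A (Python) =====
-- def one_four(string):
--
--     # Assume input is made of alphabetical chars only.
--     char_counts = [0] * 26  # Alphabet list.
--     a = ord('A')
--     z = ord('Z')
--
--     for char in string:  # O(N) loop.
--         char_val = ord(char.upper())
--         if char_val >= a and char_val <= z:
--             char_counts[char_val-a] += 1
--
--     # Two cases for palindrome.
--     # One: if all chars have even counts.
--     # Two: if all chars have even counts and one char as odd count.
--     odd_count = 0
--     for num in char_counts:
--         if num % 2 != 0:
--             odd_count += 1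
--         if odd_count > 1:
--             return False
--
--     return True
-- ===== SOURCE B (Python) =====
-- def one_four(string):
--     # Palindrome permutation: at most one letter of the alphabet may occur an
--     # odd number of times. Instead of building a count array in one pass, scan
--     # the string once per alphabet letter and sum the parities of the counts.
--     odd = sum(sum(1 for c in string if c.upper() == ch) % 2
--               for ch in "ABCDEFGHIJKLMNOPQRSTUVWXYZ")
--     return odd <= 1
-- ===== Notes on version B (the rewrite author's own statement) =====
-- stated objective: alternative
-- what changed: Replaces A's single pass that builds a 26-slot count array (plus a separate odd-count scan with early exit) by 26 staged scans of the string, one per alphabet letter, summing the parity of each letter's occurrence count and comparing the sum to 1.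
import Mathlib
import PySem

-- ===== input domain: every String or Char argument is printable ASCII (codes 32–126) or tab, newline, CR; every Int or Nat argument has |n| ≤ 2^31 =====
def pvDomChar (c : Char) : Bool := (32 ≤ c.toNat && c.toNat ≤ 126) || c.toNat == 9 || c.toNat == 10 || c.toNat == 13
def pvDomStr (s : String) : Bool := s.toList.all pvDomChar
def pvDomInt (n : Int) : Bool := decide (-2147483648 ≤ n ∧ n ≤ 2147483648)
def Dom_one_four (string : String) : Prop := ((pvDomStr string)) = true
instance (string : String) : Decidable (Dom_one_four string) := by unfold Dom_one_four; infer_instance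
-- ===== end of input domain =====

-- B replaces A's one-pass 26-slot count array (plus odd-count scan) by 26 staged scans of
-- the string, one per alphabet letter, summing the parities (objective: alternative).

-- ===== PORT A =====

-- ord(char.upper()): exact on the ASCII domain (uppercases 'a'..'z', identity otherwise)
def pvUpperOrd (ch : Char) : Nat :=
  let v := ch.toNat
  if 97 ≤ v ∧ v ≤ 122 then v - 32 else v

-- loop body of A's counting loop; the list index char_val-65 is always in range 0..25,
-- so Python's in-place `char_counts[i] += 1` is exactly List.set / List.getD here
def pvStepA (cs : List Nat) (ch : Char) : List Nat :=
  let charVal := pvUpperOrd ch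
  if 65 ≤ charVal ∧ charVal ≤ 90 then
    cs.set (charVal - 65) (cs.getD (charVal - 65) 0 + 1)
  else cs

-- A's second loop with its early `return False`
def pvOddLoop : List Nat → Nat → Bool
  | [], _ => true
  | n :: rest, oddCount =>
    let oddCount := if n % 2 ≠ 0 then oddCount + 1 else oddCount
    if oddCount > 1 then false else pvOddLoop rest oddCount

def one_four (string : String) : Bool :=
  let charCounts := string.toList.foldl pvStepA (List.replicate 26 0)
  pvOddLoop charCounts 0

-- ===== PORT B =====

-- char.upper(): exact on the ASCII domain (uppercases 'a'..'z', identity otherwise)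
def pvUpperChar (ch : Char) : Char :=
  let v := ch.toNat
  if 97 ≤ v ∧ v ≤ 122 then Char.ofNat (v - 32) else ch

-- the alphabet string B iterates over
def pvAlphabet : List Char := "ABCDEFGHIJKLMNOPQRSTUVWXYZ".toList

-- inner generator: sum(1 for c in string if c.upper() == ch)
def pvCountLetter (l : List Char) (ch : Char) : Nat :=
  l.countP (fun c => pvUpperChar c == ch)

def one_four_alt (string : String) : Bool :=
  let odd := (pvAlphabet.map (fun ch => pvCountLetter string.toList ch % 2)).sum
  decide (odd ≤ 1)

-- ===== PRECONDITION & SPEC =====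
def Spec_one_four (string : String) (out : Bool) : Prop := out = one_four_alt string
instance (string : String) (out : Bool) : Decidable (Spec_one_four string out) := by unfold Spec_one_four; infer_instance

-- ===== CLAIM (what is proved, stated in full; the proofs are below) =====
def Claim_equal_one_four : Prop := ∀ (string : String), Dom_one_four string → Spec_one_four string (one_four string)

-- ===== LEMMAS AND PROOFS =====

-- A's second loop computes "number of odd entries (+ carried count) <= 1"
theorem pvOddLoop_eq (l : List Nat) (c : Nat) (hc : c ≤ 1) :
    pvOddLoop l c = decide (l.countP (fun n => decide (n % 2 ≠ 0)) + c ≤ 1) := by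
  induction l generalizing c with
  | nil => simp [pvOddLoop, hc]
  | cons n rest ih =>
    by_cases h : n % 2 ≠ 0
    · have hcnt : List.countP (fun m => decide (m % 2 ≠ 0)) (n :: rest) =
          List.countP (fun m => decide (m % 2 ≠ 0)) rest + 1 := by
        simp [List.countP_cons, h]
      by_cases h2 : c + 1 > 1
      · have hl : pvOddLoop (n :: rest) c = false := by
          simp [pvOddLoop, h, h2]
        rw [hl, hcnt]
        symm
        rw [decide_eq_false_iff_not]
        omega
      · have hl : pvOddLoop (n :: rest) c = pvOddLoop rest (c + 1) := by
          simp [pvOddLoop, h, h2]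
        rw [hl, ih _ (by omega), hcnt, decide_eq_decide]
        omega
    · have hcnt : List.countP (fun m => decide (m % 2 ≠ 0)) (n :: rest) =
          List.countP (fun m => decide (m % 2 ≠ 0)) rest := by
        have h0 : n % 2 = 0 := by omega
        simp [h0]
      have h2 : ¬ c > 1 := by omega
      have hl : pvOddLoop (n :: rest) c = pvOddLoop rest c := by
        simp [pvOddLoop, h, h2]
      rw [hl, ih _ hc, hcnt]

-- countP over a list = countP of the index predicate over range of its length
theorem pvCountP_range_getD (l : List Nat) (p : Nat → Bool) :
    (List.range l.length).countP (fun i => p (l.getD i 0)) = l.countP p := by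
  induction l with
  | nil => simp
  | cons a rest ih =>
    rw [List.length_cons, List.range_succ_eq_map, List.countP_cons, List.countP_map,
      List.countP_cons, ← ih]
    simp [Function.comp_def, Nat.add_comm]

-- unfolding one step of A's loop, letter branch
theorem pvStepA_pos (cs : List Nat) (a : Char) (hc : 65 ≤ pvUpperOrd a ∧ pvUpperOrd a ≤ 90) :
    pvStepA cs a = cs.set (pvUpperOrd a - 65) (cs.getD (pvUpperOrd a - 65) 0 + 1) := by
  simp [pvStepA, hc]

-- unfolding one step of A's loop, non-letter branch
theorem pvStepA_neg (cs : List Nat) (a : Char) (hc : ¬ (65 ≤ pvUpperOrd a ∧ pvUpperOrd a ≤ 90)) :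
    pvStepA cs a = cs := by
  simp [pvStepA, hc]

-- A's fold builds exactly the per-letter counts
theorem pvFoldA_getD (l : List Char) (cs : List Nat) (hlen : cs.length = 26)
    (i : Nat) (hi : i < 26) :
    (l.foldl pvStepA cs).getD i 0 =
      cs.getD i 0 + l.countP (fun c => pvUpperOrd c == i + 65) := by
  induction l generalizing cs with
  | nil => simp
  | cons a rest ih =>
    rw [List.foldl_cons, List.countP_cons]
    by_cases hc : 65 ≤ pvUpperOrd a ∧ pvUpperOrd a ≤ 90
    · rw [pvStepA_pos cs a hc]
      have hlen' : (cs.set (pvUpperOrd a - 65) (cs.getD (pvUpperOrd a - 65) 0 + 1)).length = 26 := by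
        simpa using hlen
      rw [ih _ hlen']
      by_cases hia : pvUpperOrd a = i + 65
      · have hidx : pvUpperOrd a - 65 = i := by omega
        rw [hidx]
        have hset : (cs.set i (cs.getD i 0 + 1)).getD i 0 = cs.getD i 0 + 1 := by
          have hil : i < cs.length := by omega
          simp [List.getD_eq_getElem?_getD, hil]
        rw [hset]
        simp [hia]
        omega
      · have hne : pvUpperOrd a - 65 ≠ i := by omega
        have hset : (cs.set (pvUpperOrd a - 65) (cs.getD (pvUpperOrd a - 65) 0 + 1)).getD i 0 =
            cs.getD i 0 := by
          simp [List.getD_eq_getElem?_getD, hne]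
        rw [hset]
        simp [hia]
    · rw [pvStepA_neg cs a hc, ih _ hlen]
      have hne : ¬ (pvUpperOrd a == i + 65) = true := by
        intro h
        exact hc (by have := beq_iff_eq.mp h; omega)
      simp [hne]

theorem pvFoldA_length (l : List Char) (cs : List Nat) :
    (l.foldl pvStepA cs).length = cs.length := by
  induction l generalizing cs with
  | nil => rfl
  | cons a rest ih =>
    rw [List.foldl_cons, ih]
    by_cases hc : 65 ≤ pvUpperOrd a ∧ pvUpperOrd a ≤ 90
    · rw [pvStepA_pos cs a hc]; simp
    · rw [pvStepA_neg cs a hc]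

-- Char.ofNat on a small in-range code
theorem pvOfNat_toNat (n : Nat) (h : n < 0xD800) : (Char.ofNat n).toNat = n := by
  unfold Char.ofNat
  split
  · simp [Char.ofNatAux, Char.toNat]
  · rename_i hv
    exact absurd (Or.inl h) hv

-- pvUpperChar and pvUpperOrd agree through toNat
theorem pvUpperChar_toNat (c : Char) : (pvUpperChar c).toNat = pvUpperOrd c := by
  unfold pvUpperChar pvUpperOrd
  by_cases h : 97 ≤ c.toNat ∧ c.toNat ≤ 122
  · rw [if_pos h, if_pos h]
    exact pvOfNat_toNat _ (by omega)
  · rw [if_neg h, if_neg h]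

-- sum of a list of 0/1 values = count of the ones
theorem pvSum_binary (l : List Nat) (h : ∀ x ∈ l, x ≤ 1) :
    l.sum = l.countP (fun x => x == 1) := by
  induction l with
  | nil => rfl
  | cons a rest ih =>
    have ha : a ≤ 1 := h a (List.mem_cons_self ..)
    rw [List.sum_cons, List.countP_cons, ih (fun x hx => h x (List.mem_cons_of_mem _ hx))]
    interval_cases a <;> simp
    omega

-- ===== VERDICT (by name: the statement is the Claim_ definition above) =====
theorem one_four_spec : Claim_equal_one_four := by
  intro s _
  unfold Spec_one_four
  simp only [one_four, one_four_alt]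
  set l := s.toList with hl
  have hlen : (l.foldl pvStepA (List.replicate 26 0)).length = 26 := by
    rw [pvFoldA_length]; simp
  -- A side: pvOddLoop = decide (number of odd per-letter counts ≤ 1)
  rw [pvOddLoop_eq _ _ (by omega)]
  rw [← pvCountP_range_getD, hlen]
  have hA : (List.range 26).countP
      (fun i => decide ((l.foldl pvStepA (List.replicate 26 0)).getD i 0 % 2 ≠ 0)) =
      (List.range 26).countP (fun i => decide (l.countP (fun c => pvUpperOrd c == i + 65) % 2 ≠ 0)) := by
    apply List.countP_congr
    intro i hi
    have hi26 : i < 26 := List.mem_range.mp hi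
    rw [pvFoldA_getD l _ (by simp) i hi26]
    have h0 : (List.replicate 26 (0:Nat)).getD i 0 = 0 := by
      rw [List.getD_eq_getElem?_getD, List.getElem?_replicate]
      simp [hi26]
    rw [h0]
    simp
  rw [hA]
  -- B side: sum of per-letter parities = count of odd letters
  have hB : (pvAlphabet.map (fun ch => pvCountLetter l ch % 2)).sum =
      (List.range 26).countP (fun i => decide (l.countP (fun c => pvUpperOrd c == i + 65) % 2 ≠ 0)) := by
    have halpha : pvAlphabet = (List.range 26).map (fun i => Char.ofNat (i + 65)) := by decide
    rw [halpha, List.map_map]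
    rw [pvSum_binary _ (by
      intro x hx
      simp only [List.mem_map, Function.comp] at hx
      obtain ⟨i, _, rfl⟩ := hx
      omega)]
    rw [List.countP_map]
    apply List.countP_congr
    intro i hi
    have hi26 : i < 26 := List.mem_range.mp hi
    have hcnt : pvCountLetter l (Char.ofNat (i + 65)) =
        l.countP (fun c => pvUpperOrd c == i + 65) := by
      unfold pvCountLetter
      apply List.countP_congr
      intro c _
      have htn : (Char.ofNat (i + 65)).toNat = i + 65 := pvOfNat_toNat _ (by omega)
      constructor
      · intro h
        have h1 : pvUpperChar c = Char.ofNat (i + 65) := beq_iff_eq.mp h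
        have h2 : (pvUpperChar c).toNat = i + 65 := by rw [h1, htn]
        rw [pvUpperChar_toNat] at h2
        exact beq_iff_eq.mpr h2
      · intro h
        have h2 : pvUpperOrd c = i + 65 := beq_iff_eq.mp h
        have h3 : (pvUpperChar c).toNat = (Char.ofNat (i + 65)).toNat := by
          rw [pvUpperChar_toNat, htn, h2]
        have h4 : pvUpperChar c = Char.ofNat (i + 65) := by
          apply Char.ext
          exact UInt32.toNat_inj.mp h3
        exact beq_iff_eq.mpr h4
    simp only [Function.comp, hcnt]
    constructor
    · intro h
      have h1 : l.countP (fun c => pvUpperOrd c == i + 65) % 2 = 1 := beq_iff_eq.mp h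
      simp
      omega
    · intro h
      have h1 : l.countP (fun c => pvUpperOrd c == i + 65) % 2 ≠ 0 := by simpa using h
      exact beq_iff_eq.mpr (by omega)
  rw [hB, decide_eq_decide]
  omega
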